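-- pv_equiv track=rewrite | github.com/aszpik12/agazatipython | korok.py | elso_idos
-- ===== SOURCE A (Python) =====
-- def elso_idos(lista):
--     elso = 0
--     index = len(lista)
--     while index > 0:
--         if lista[index-1] > 70:
--             elso = index-1
--         index-=1
--     return elso
-- ===== SOURCE B (Python) =====
-- def elso_idos(lista):
--     for i, x in enumerate(lista):
--         if x > 70:
--             return i
--     return 0
-- ===== Notes on version B (the rewrite author's own statement) =====
-- stated objective: idiomatic
-- what changed: B is a forward single pass with early exit returning the first index whose element exceeds 70 (default 0), instead of A's backward full scan that keeps overwriting an accumulator.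
import Mathlib
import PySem

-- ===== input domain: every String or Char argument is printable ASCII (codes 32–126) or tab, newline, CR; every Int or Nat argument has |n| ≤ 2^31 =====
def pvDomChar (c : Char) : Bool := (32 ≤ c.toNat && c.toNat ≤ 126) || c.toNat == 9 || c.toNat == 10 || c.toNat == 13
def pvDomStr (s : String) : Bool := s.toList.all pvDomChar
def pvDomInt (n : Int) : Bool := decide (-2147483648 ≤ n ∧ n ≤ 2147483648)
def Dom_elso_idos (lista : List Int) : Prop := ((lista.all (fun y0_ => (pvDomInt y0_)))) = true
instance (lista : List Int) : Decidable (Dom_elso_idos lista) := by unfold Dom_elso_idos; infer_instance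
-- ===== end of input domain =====

-- B: forward single pass with early exit (first index with element > 70, default 0),
-- instead of A's backward full scan overwriting an accumulator; idiomatic rewrite.


-- ===== PORT A =====
-- A's while-loop: index counts down from len(lista) to 1; lista[index-1] is always in range.
def elsoAux (lista : List Int) : Nat → Int → Int
  | 0, elso => elso
  | n + 1, elso => elsoAux lista n (if lista.getD n 0 > 70 then (n : Int) else elso)

def elso_idos (lista : List Int) : Int := elsoAux lista lista.length 0

-- ===== PORT B =====
-- forward scan with running index, early exit on the first element > 70
def elsoFwd (l : List Int) (i : Nat) : Int :=
  match l with
  | [] => 0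
  | x :: xs => if x > 70 then (i : Int) else elsoFwd xs (i + 1)

def elso_idos_alt (lista : List Int) : Int := elsoFwd lista 0

-- ===== PRECONDITION & SPEC =====
def Spec_elso_idos (lista : List Int) (out : Int) : Prop := out = elso_idos_alt lista
instance (lista : List Int) (out : Int) : Decidable (Spec_elso_idos lista out) := by unfold Spec_elso_idos; infer_instance

-- ===== CLAIM (what is proved, stated in full; the proofs are below) =====
def Claim_equal_elso_idos : Prop := ∀ (lista : List Int), Dom_elso_idos lista → Spec_elso_idos lista (elso_idos lista)

-- ===== LEMMAS AND PROOFS =====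

-- find? only depends on the predicate's values on the list's members
theorem find?_congr_mem {α : Type} (l : List α) (p q : α → Bool)
    (h : ∀ x ∈ l, p x = q x) : l.find? p = l.find? q := by
  induction l with
  | nil => rfl
  | cons a l ih =>
    simp only [List.find?]
    rw [h a (List.mem_cons_self ..), ih (fun x hx => h x (List.mem_cons_of_mem _ hx))]

-- A's loop over the first n positions computes the least qualifying index < n, else the accumulator.
theorem elsoAux_eq_find (lista : List Int) (n : Nat) (elso : Int) :
    elsoAux lista n elso =
      match (List.range n).find? (fun i => decide (lista.getD i 0 > 70)) with
      | some i => (i : Int)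
      | none => elso := by
  induction n generalizing elso with
  | zero => simp [elsoAux]
  | succ n ih =>
    rw [elsoAux, ih]
    rw [List.range_succ, List.find?_append]
    cases h : (List.range n).find? (fun i => decide (lista.getD i 0 > 70)) with
    | some i => simp
    | none =>
      simp only [Option.none_or, List.find?, List.getD]
      by_cases hp : (70 : Int) < lista[n]?.getD 0 <;> simp [hp]

-- B's forward scan computes the same least-index characterization, shifted by the start offset.
theorem elsoFwd_eq_find (l : List Int) (i : Nat) :
    elsoFwd l i =
      match l.findIdx? (fun x => decide (x > 70)) with
      | some j => ((i + j : Nat) : Int)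
      | none => 0 := by
  induction l generalizing i with
  | nil => simp [elsoFwd]
  | cons x xs ih =>
    rw [elsoFwd]
    by_cases hp : x > 70
    · simp [List.findIdx?_cons, hp]
    · rw [if_neg hp, ih]
      cases h : xs.findIdx? (fun x => decide (x > 70)) with
      | some j => simp [List.findIdx?_cons, hp, h]; ring
      | none => simp [List.findIdx?_cons, hp, h]

-- the two characterizations coincide: find? over range len ↔ findIdx?
theorem range_find_eq_findIdx (l : List Int) :
    (List.range l.length).find? (fun i => decide (l.getD i 0 > 70)) =
      l.findIdx? (fun x => decide (x > 70)) := by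
  induction l using List.reverseRecOn with
  | nil => simp
  | append_singleton xs x ih =>
    rw [List.length_append, List.length_singleton, List.range_succ, List.find?_append,
        List.findIdx?_append]
    have hcong : (List.range xs.length).find? (fun i => decide ((xs ++ [x]).getD i 0 > 70)) =
        (List.range xs.length).find? (fun i => decide (xs.getD i 0 > 70)) := by
      apply find?_congr_mem
      intro i hi
      rw [List.mem_range] at hi
      rw [List.getD_append _ _ _ _ hi]
    rw [hcong, ih]
    cases h : xs.findIdx? (fun x => decide (x > 70)) with
    | some j => simp
    | none =>
      have hlen : (xs ++ [x]).getD xs.length 0 = x := by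
        simp [List.getD_eq_getElem?_getD]
      simp only [Option.none_or, List.find?, List.findIdx?_cons, hlen]
      by_cases hp : (70 : Int) < x <;> simp [hp]

-- ===== VERDICT (by name: the statement is the Claim_ definition above) =====
theorem elso_idos_spec : Claim_equal_elso_idos := by
  intro lista _
  unfold Spec_elso_idos elso_idos elso_idos_alt
  rw [elsoAux_eq_find, elsoFwd_eq_find, range_find_eq_findIdx]
  cases h : lista.findIdx? (fun x => decide (x > 70)) <;> simp
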